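-- pv_equiv track=rewrite | github.com/hyeri0903/coding-test-practice | programmers/WeeklyChallenge/Week1_부족한금액계산하기.py | solution
-- ===== SOURCE A (Python) =====
-- def solution(price, money, count):
--     answer = -1
--     total = 0
--     for i in range(1, count+1):
--         p = price * i
--         total += p
--
--     if(money > total):
--         answer = 0
--     else:
--         answer = total - money
--     return answer
-- ===== SOURCE B (Python) =====
-- def solution(price, money, count):
--     n = count if count > 0 else 0
--     total = price * n * (n + 1) // 2
--     shortfall = total - money
--     return shortfall if shortfall >= 0 else 0
-- ===== Notes on version B (the rewrite author's own statement) =====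
-- stated objective: faster
-- what changed: Replaced the O(count) accumulation loop with the arithmetic-series closed form price*n*(n+1)//2.
import Mathlib
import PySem

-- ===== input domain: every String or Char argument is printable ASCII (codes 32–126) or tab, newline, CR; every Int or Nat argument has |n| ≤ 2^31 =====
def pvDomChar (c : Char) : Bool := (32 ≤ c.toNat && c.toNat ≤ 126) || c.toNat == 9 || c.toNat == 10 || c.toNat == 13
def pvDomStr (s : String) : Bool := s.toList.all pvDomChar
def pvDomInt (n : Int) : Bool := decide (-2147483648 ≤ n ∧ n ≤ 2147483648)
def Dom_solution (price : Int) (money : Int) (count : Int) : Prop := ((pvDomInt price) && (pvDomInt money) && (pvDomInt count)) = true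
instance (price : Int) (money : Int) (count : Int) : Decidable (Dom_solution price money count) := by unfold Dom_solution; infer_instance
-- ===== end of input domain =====

-- B replaces A's O(count) summation loop by the arithmetic-series closed form (objective: faster).

-- ===== PORT A =====
def solution (price : Int) (money : Int) (count : Int) : Int :=
  let answer : Int := -1
  let total : Int := (PySem.List.pyRange 1 (count + 1) 1).foldl
    (fun total i => total + price * i) 0
  let _ := answer
  if money > total then 0 else total - money

-- ===== PORT B =====
def solution_alt (price : Int) (money : Int) (count : Int) : Int :=
  let n : Int := if count > 0 then count else 0
  let total : Int := PySem.Int.floordiv (price * n * (n + 1)) 2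
  let shortfall : Int := total - money
  if shortfall ≥ 0 then shortfall else 0

-- ===== PRECONDITION & SPEC =====
def Spec_solution (price : Int) (money : Int) (count : Int) (out : Int) : Prop := out = solution_alt price money count
instance (price : Int) (money : Int) (count : Int) (out : Int) : Decidable (Spec_solution price money count out) := by unfold Spec_solution; infer_instance

-- ===== CLAIM (what is proved, stated in full; the proofs are below) =====
def Claim_equal_solution : Prop := ∀ (price : Int) (money : Int) (count : Int), Dom_solution price money count → Spec_solution price money count (solution price money count)

-- ===== LEMMAS AND PROOFS =====

-- A's loop total, doubled, equals price * (k*(k+1)) for count = k ≥ 0.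
theorem pv_foldl_sum (price : Int) (k : Nat) :
    2 * (PySem.List.pyRange 1 ((k : Int) + 1) 1).foldl (fun t i => t + price * i) 0
      = price * ((k : Int) * ((k : Int) + 1)) := by
  induction k with
  | zero => rw [PySem.List.pyRange_one_eq_nil (by norm_num)]; simp
  | succ k ih =>
      have h : ((k : Int) + 1) + 1 = (((k + 1 : Nat) : Int)) + 1 := by push_cast; ring
      rw [← h, PySem.List.pyRange_one_succ_right (by omega), List.foldl_append]
      simp only [List.foldl_cons, List.foldl_nil]
      push_cast
      linear_combination ih

theorem pv_floordiv_two (s : Int) : PySem.Int.floordiv (2 * s) 2 = s := by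
  simp [PySem.Int.floordiv]

-- ===== VERDICT (by name: the statement is the Claim_ definition above) =====
theorem solution_spec : Claim_equal_solution := by
  intro price money count _
  unfold Spec_solution solution solution_alt
  by_cases hc : count > 0
  · have hk : ((count.toNat : Int)) = count := Int.toNat_of_nonneg (le_of_lt hc)
    have hsum := pv_foldl_sum price count.toNat
    rw [hk] at hsum
    simp only [hc, if_pos]
    set t := (PySem.List.pyRange 1 (count + 1) 1).foldl (fun t i => t + price * i) 0 with ht
    have h2 : price * count * (count + 1) = 2 * t := by rw [mul_assoc, ← hsum]
    rw [h2, pv_floordiv_two]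
    by_cases hm : money > t
    · rw [if_pos hm, if_neg (by omega)]
    · rw [if_neg hm, if_pos (by omega)]
  · rw [PySem.List.pyRange_one_eq_nil (by omega)]
    simp only [List.foldl_nil, if_neg hc]
    have h0 : PySem.Int.floordiv (price * 0 * (0 + 1)) 2 = 0 := by
      simp [PySem.Int.floordiv]
    rw [h0]
    by_cases hm : money > 0
    · rw [if_pos hm, if_neg (by omega)]
    · rw [if_neg hm, if_pos (by omega)]
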